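-- pv_equiv track=rewrite | github.com/mattayamini/python | big_count.py | Big_count
-- ===== SOURCE A (Python) =====
-- def Big_count(n):
--     c=0
--     b=0
--     while n:
--         d=n%10
--         n=n//10
--         if(d>b):
--             b=d
--             c=0
--         if b==d:
--             c+=1
--     return c
-- ===== SOURCE B (Python) =====
-- def Big_count(n):
--     # pass 1: find the largest digit
--     b = 0
--     m = n
--     while m:
--         d = m % 10
--         m = m // 10
--         if d > b:
--             b = d
--     # pass 2: count occurrences of that digit
--     c = 0
--     m = n
--     while m:
--         d = m % 10
--         m = m // 10
--         if d == b:
--             c += 1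
--     return c
-- ===== Notes on version B (the rewrite author's own statement) =====
-- stated objective: simpler
-- what changed: B replaces A's single online scan with intertwined max/counter-reset state by two plain sequential digit scans: one finds the largest digit, one counts it.
import Mathlib
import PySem

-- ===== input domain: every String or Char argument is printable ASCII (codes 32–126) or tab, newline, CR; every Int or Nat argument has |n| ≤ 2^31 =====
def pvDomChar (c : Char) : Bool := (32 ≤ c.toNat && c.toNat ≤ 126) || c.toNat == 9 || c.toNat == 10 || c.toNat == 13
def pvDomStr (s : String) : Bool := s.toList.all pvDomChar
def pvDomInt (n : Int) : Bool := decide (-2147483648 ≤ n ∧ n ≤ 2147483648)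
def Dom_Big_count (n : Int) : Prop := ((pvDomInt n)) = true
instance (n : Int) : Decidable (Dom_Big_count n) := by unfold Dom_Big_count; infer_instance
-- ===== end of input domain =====

-- B changes decomposition only (two sequential digit scans instead of A's online scan); return values proved equal for n ≥ 0.

-- ===== PORT A =====
-- A's while loop; on n ≥ 0 (all Pre_ admits) Python's % and // agree with Nat's, so the state is kept in Nat/Int.
def bcLoopA (n : Nat) (c : Int) (b : Nat) : Int :=
  if n = 0 then c
  else
    let d := n % 10
    let b' := if d > b then d else b
    let c' := if d > b then 0 else c
    let c'' := if b' = d then c' + 1 else c'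
    bcLoopA (n / 10) c'' b'
decreasing_by exact Nat.div_lt_self (Nat.pos_of_ne_zero (by assumption)) (by norm_num)

def Big_count (n : Int) : Int := bcLoopA n.toNat 0 0

-- ===== PORT B =====
def bcMaxLoop (m b : Nat) : Nat :=
  if m = 0 then b
  else bcMaxLoop (m / 10) (if m % 10 > b then m % 10 else b)
decreasing_by exact Nat.div_lt_self (Nat.pos_of_ne_zero (by assumption)) (by norm_num)

def bcCntLoop (m b : Nat) (c : Int) : Int :=
  if m = 0 then c
  else bcCntLoop (m / 10) b (if m % 10 = b then c + 1 else c)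
decreasing_by exact Nat.div_lt_self (Nat.pos_of_ne_zero (by assumption)) (by norm_num)

def Big_count_alt (n : Int) : Int := bcCntLoop n.toNat (bcMaxLoop n.toNat 0) 0

-- ===== PRECONDITION & SPEC =====
-- (no Pre_: on n < 0 both Pythons loop forever in the same `while m: m //= 10` shape, and both ports return 0 there, so the equation is unconditional)
def Spec_Big_count (n : Int) (out : Int) : Prop := out = Big_count_alt n
instance (n : Int) (out : Int) : Decidable (Spec_Big_count n out) := by unfold Spec_Big_count; infer_instance

-- ===== CLAIM (what is proved, stated in full; the proofs are below) =====
def Claim_equal_Big_count : Prop := ∀ (n : Int), Dom_Big_count n → Spec_Big_count n (Big_count n)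

-- ===== LEMMAS AND PROOFS =====
-- largest digit of n (0 for n = 0)
def bcMaxD (n : Nat) : Nat :=
  if n = 0 then 0 else max (n % 10) (bcMaxD (n / 10))
decreasing_by exact Nat.div_lt_self (Nat.pos_of_ne_zero (by assumption)) (by norm_num)

-- count of digit x among n's digits (0 for n = 0)
def bcCntD (n x : Nat) : Int :=
  if n = 0 then 0 else (if n % 10 = x then 1 else 0) + bcCntD (n / 10) x
decreasing_by exact Nat.div_lt_self (Nat.pos_of_ne_zero (by assumption)) (by norm_num)

theorem bcMaxLoop_eq (m b : Nat) : bcMaxLoop m b = max b (bcMaxD m) := by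
  fun_induction bcMaxLoop m b with
  | case1 => simp_all [bcMaxD]
  | case2 m b h ih =>
    simp only [dite_eq_ite] at ih
    rw [ih, show bcMaxD m = max (m % 10) (bcMaxD (m / 10)) from by rw [bcMaxD, if_neg h]]
    split_ifs <;> omega

theorem bcCntLoop_eq (m b : Nat) (c : Int) : bcCntLoop m b c = c + bcCntD m b := by
  fun_induction bcCntLoop m b c with
  | case1 => simp_all [bcCntD]
  | case2 m c h ih =>
    simp only [dite_eq_ite] at ih
    rw [ih, show bcCntD m b = (if m % 10 = b then 1 else 0) + bcCntD (m / 10) b from by rw [bcCntD, if_neg h]]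
    split_ifs <;> omega

theorem bcLoopA_eq : ∀ (n : Nat) (c : Int) (b : Nat),
    bcLoopA n c b =
      (if b = max b (bcMaxD n) then c else 0) + bcCntD n (max b (bcMaxD n)) := by
  intro n
  induction n using Nat.strong_induction_on with
  | _ n IH =>
    intro c b
    by_cases h : n = 0
    · subst h; rw [bcLoopA]; simp [bcMaxD, bcCntD]
    · rw [bcLoopA, if_neg h]
      dsimp only
      rw [IH (n / 10) (Nat.div_lt_self (Nat.pos_of_ne_zero h) (by norm_num))]
      rw [show bcMaxD n = max (n % 10) (bcMaxD (n / 10)) from by rw [bcMaxD, if_neg h]]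
      rw [show ∀ x, bcCntD n x = (if n % 10 = x then 1 else 0) + bcCntD (n / 10) x from fun x => by rw [bcCntD, if_neg h]]
      by_cases hd : n % 10 > b
      · rw [if_pos hd, if_pos hd]
        have hM : max b (max (n % 10) (bcMaxD (n / 10))) = max (n % 10) (bcMaxD (n / 10)) := by omega
        rw [hM]
        have hb : ¬ b = max (n % 10) (bcMaxD (n / 10)) := by omega
        rw [if_neg hb]
        split_ifs <;> omega
      · rw [if_neg hd, if_neg hd]
        have hM : max b (max (n % 10) (bcMaxD (n / 10))) = max b (bcMaxD (n / 10)) := by omega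
        rw [hM]
        by_cases hb : b = max b (bcMaxD (n / 10))
        · rw [if_pos hb, if_pos hb]
          split_ifs <;> omega
        · rw [if_neg hb, if_neg hb]
          have : ¬ n % 10 = max b (bcMaxD (n / 10)) := by omega
          split_ifs
          omega

-- ===== VERDICT (by name: the statement is the Claim_ definition above) =====
theorem Big_count_spec : Claim_equal_Big_count := by
  intro n _
  show Big_count n = Big_count_alt n
  unfold Big_count Big_count_alt
  rw [bcLoopA_eq, bcCntLoop_eq, bcMaxLoop_eq]
  simp
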